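-- pv_equiv track=rewrite | github.com/Bugxit/Customizable-Compiled-PL | ccpl/api.py | getRidOfString
-- ===== SOURCE A (Python) =====
-- def getRidOfString(text : str) -> list:
--     stringOpened = False
--     textList = []
--     openedChar = ""
--
--     for letter in text:
--         if letter in ["'", '"'] and not stringOpened:
--             stringOpened = True
--             openedChar = letter
--         elif letter == openedChar and stringOpened:
--             stringOpened = False
--
--         if stringOpened:
--             textList.append("")
--         else:
--             textList.append(letter)
--     return textList
-- ===== SOURCE B (Python) =====
-- def getRidOfString(text):
--     out = []
--     i = 0
--     n = len(text)
--     while i < n: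
--         ch = text[i]
--         if ch in ("'", '"'):
--             out.append("")
--             i += 1
--             while i < n and text[i] != ch:
--                 out.append("")
--                 i += 1
--             if i < n:
--                 out.append(ch)
--                 i += 1
--         else:
--             out.append(ch)
--             i += 1
--     return out
-- ===== Notes on version B (the rewrite author's own statement) =====
-- stated objective: alternative
-- what changed: Replaced A's boolean-flag single flat pass with an index-driven outer loop that, on an opening quote, runs an explicit inner loop blanking the whole quoted run up to the matching quote (kept) or the end, maintaining no boolean state.
import Mathlib
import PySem

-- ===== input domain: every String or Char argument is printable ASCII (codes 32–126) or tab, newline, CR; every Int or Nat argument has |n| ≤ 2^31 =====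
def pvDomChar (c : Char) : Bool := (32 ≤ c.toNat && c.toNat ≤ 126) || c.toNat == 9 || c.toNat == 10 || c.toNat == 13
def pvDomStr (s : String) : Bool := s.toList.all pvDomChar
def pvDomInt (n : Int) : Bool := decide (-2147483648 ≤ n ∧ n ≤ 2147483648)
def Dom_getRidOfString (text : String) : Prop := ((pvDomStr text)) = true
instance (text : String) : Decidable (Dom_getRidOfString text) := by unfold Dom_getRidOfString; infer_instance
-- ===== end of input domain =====

-- B replaces A's boolean-flag flat pass by an index-driven outer loop with an explicit
-- inner loop that blanks a whole quoted run at once (objective: alternative decomposition).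

-- ===== PORT A =====
-- A's for-loop over the characters, with the same state (stringOpened, openedChar);
-- openedChar's initial Python value "" (matching no character) is ported as Option.none.
def pvGoA (stringOpened : Bool) (openedChar : Option Char) : List Char → List String
  | [] => []
  | letter :: rest =>
    let st :=
      if (letter = '\'' ∨ letter = '"') ∧ stringOpened = false then (true, some letter)
      else if some letter = openedChar ∧ stringOpened = true then (false, openedChar)
      else (stringOpened, openedChar)
    (if st.1 then "" else String.ofList [letter]) :: pvGoA st.1 st.2 rest

def getRidOfString (text : String) : List String :=
  pvGoA false none text.toList

-- ===== PORT B =====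
-- inner while loop: blanks characters until the matching quote q (kept verbatim) or the end;
-- returns the emitted pieces and the remaining characters.
def pvBlankRun (q : Char) : List Char → List String × List Char
  | [] => ([], [])
  | c :: rest =>
    if c = q then ([String.ofList [c]], rest)
    else
      let p := pvBlankRun q rest
      ("" :: p.1, p.2)

theorem pvBlankRun_len (q : Char) (l : List Char) : (pvBlankRun q l).2.length ≤ l.length := by
  induction l with
  | nil => simp [pvBlankRun]
  | cons c rest ih =>
    simp only [pvBlankRun]
    split
    · simp
    · simpa using Nat.le_succ_of_le ih

-- outer while loop over the remaining characters
def pvGoB : List Char → List String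
  | [] => []
  | c :: rest =>
    if c = '\'' ∨ c = '"' then
      let p := pvBlankRun c rest
      "" :: (p.1 ++ pvGoB p.2)
    else String.ofList [c] :: pvGoB rest
termination_by l => l.length
decreasing_by
  · exact Nat.lt_succ_of_le (pvBlankRun_len c rest)
  · simp

def getRidOfString_alt (text : String) : List String :=
  pvGoB text.toList

-- ===== PRECONDITION & SPEC =====
def Spec_getRidOfString (text : String) (out : List String) : Prop := out = getRidOfString_alt text
instance (text : String) (out : List String) : Decidable (Spec_getRidOfString text out) := by unfold Spec_getRidOfString; infer_instance

-- ===== CLAIM (what is proved, stated in full; the proofs are below) =====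
def Claim_equal_getRidOfString : Prop := ∀ (text : String), Dom_getRidOfString text → Spec_getRidOfString text (getRidOfString text)

-- ===== LEMMAS AND PROOFS =====

-- Closed state is independent of openedChar, and open state equals the inner blanking run
-- followed by the closed continuation: proved together by induction on the character list.
theorem pvGo_eq (l : List Char) :
    (∀ oc, pvGoA false oc l = pvGoB l) ∧
    (∀ q, pvGoA true (some q) l = (pvBlankRun q l).1 ++ pvGoB (pvBlankRun q l).2) := by
  induction l with
  | nil => simp [pvGoA, pvGoB, pvBlankRun]
  | cons c rest ih =>
    constructor
    · intro oc
      by_cases hq : c = '\'' ∨ c = '"'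
      · simp [pvGoA, pvGoB, hq, ih.2 c]
      · simp [pvGoA, pvGoB, hq, ih.1 oc]
    · intro q
      by_cases hc : c = q
      · subst hc
        simp [pvGoA, pvBlankRun, ih.1 (some c)]
      · simp [pvGoA, pvBlankRun, hc, ih.2 q]

-- ===== VERDICT (by name: the statement is the Claim_ definition above) =====
theorem getRidOfString_spec : Claim_equal_getRidOfString := by
  intro text _
  unfold Spec_getRidOfString getRidOfString getRidOfString_alt
  exact (pvGo_eq text.toList).1 none
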